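-- pv_equiv track=rewrite | github.com/marinimau/Spike-detection-for-cooking-activity-recognition-based-on-indoor-air-quality-sensor | data_analysis/intervals_finder.py | count_predicted_intervals
-- ===== SOURCE A (Python) =====
-- def count_predicted_intervals(interval_list):
--     counter = 0
--     open_interval = False
--
--     for i in interval_list:
--         if i == 0:
--             if open_interval:
--                 open_interval = False
--                 counter += 1
--         else:
--             if not open_interval:
--                 open_interval = True
--     #se esco che ho un intervallo da chiudere
--     if open_interval:
--         counter += 1
--     return counter
-- ===== SOURCE B (Python) =====
-- def count_predicted_intervals(interval_list):
--     # An interval starts exactly where a nonzero element follows a zero (or the list start).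
--     # Count those rising edges by comparing the list with its one-shifted copy.
--     shifted = [0] + list(interval_list)
--     return sum(1 for prev, cur in zip(shifted, interval_list) if cur != 0 and prev == 0)
-- ===== Notes on version B (the rewrite author's own statement) =====
-- stated objective: alternative
-- what changed: Replaces the open/close flag state machine with end flush by a stateless rising-edge count: zip the list with its one-shifted copy and count positions where a nonzero element follows a zero (each interval is counted at its start, not at its close).
import Mathlib
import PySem

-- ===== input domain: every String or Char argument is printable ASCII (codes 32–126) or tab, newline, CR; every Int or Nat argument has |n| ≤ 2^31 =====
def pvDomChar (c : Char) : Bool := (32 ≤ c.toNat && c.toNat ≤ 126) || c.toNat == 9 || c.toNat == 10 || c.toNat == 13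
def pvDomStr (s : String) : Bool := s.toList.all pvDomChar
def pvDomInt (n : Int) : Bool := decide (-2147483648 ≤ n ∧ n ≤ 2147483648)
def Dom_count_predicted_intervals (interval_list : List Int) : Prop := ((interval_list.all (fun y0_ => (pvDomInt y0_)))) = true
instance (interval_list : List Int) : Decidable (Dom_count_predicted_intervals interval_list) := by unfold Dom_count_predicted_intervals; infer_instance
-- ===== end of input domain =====

-- B replaces the open/close flag state machine (count at close + final flush) by a stateless
-- rising-edge count over the list zipped with its one-shifted copy (count at interval start).

-- ===== PORT A =====
-- the for-loop over state (counter, open_interval)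
def pvALoop : Int × Bool → List Int → Int × Bool
  | s, [] => s
  | (c, op), i :: rest =>
    if i = 0 then
      (if op then pvALoop (c + 1, false) rest else pvALoop (c, op) rest)
    else
      (if ¬ op then pvALoop (c, true) rest else pvALoop (c, op) rest)

def count_predicted_intervals (interval_list : List Int) : Int :=
  let s := pvALoop (0, false) interval_list
  if s.2 then s.1 + 1 else s.1

-- ===== PORT B =====
-- shifted = [0] + list(interval_list); sum over zip(shifted, interval_list) of the rising-edge test
def count_predicted_intervals_alt (interval_list : List Int) : Int :=
  let shifted := 0 :: interval_list
  (shifted.zip interval_list).foldl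
    (fun acc pc => if pc.2 ≠ 0 ∧ pc.1 = 0 then acc + 1 else acc) 0

-- ===== PRECONDITION & SPEC =====
def Spec_count_predicted_intervals (interval_list : List Int) (out : Int) : Prop := out = count_predicted_intervals_alt interval_list
instance (interval_list : List Int) (out : Int) : Decidable (Spec_count_predicted_intervals interval_list out) := by unfold Spec_count_predicted_intervals; infer_instance

-- ===== CLAIM (what is proved, stated in full; the proofs are below) =====
def Claim_equal_count_predicted_intervals : Prop := ∀ (interval_list : List Int), Dom_count_predicted_intervals interval_list → Spec_count_predicted_intervals interval_list (count_predicted_intervals interval_list)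

-- ===== LEMMAS AND PROOFS =====

-- rising-edge count of l with "previous element nonzero" state op
def pvE (op : Bool) : List Int → Int
  | [] => 0
  | x :: xs => (if x ≠ 0 ∧ op = false then 1 else 0) + pvE (decide (x ≠ 0)) xs

-- B's fold over the shifted zip computes acc + pvE (prev ≠ 0) l
theorem pvB_fold (l : List Int) : ∀ (p acc : Int),
    ((p :: l).zip l).foldl (fun acc pc => if pc.2 ≠ 0 ∧ pc.1 = 0 then acc + 1 else acc) acc
      = acc + pvE (decide (p ≠ 0)) l := by
  induction l with
  | nil => intro p acc; simp [pvE]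
  | cons x xs ih =>
    intro p acc
    have h : (p :: (x :: xs)).zip (x :: xs) = (p, x) :: ((x :: xs).zip xs) := rfl
    rw [h, List.foldl_cons, ih x]
    by_cases hp : p = 0 <;> by_cases hx : x = 0 <;> simp [pvE, hp, hx] <;> ring

-- A's loop followed by the final flush counts c + open flush + rising edges
theorem pvALoop_flush (l : List Int) : ∀ (c : Int) (op : Bool),
    (let s := pvALoop (c, op) l; if s.2 then s.1 + 1 else s.1)
      = c + (if op then 1 else 0) + pvE op l := by
  induction l with
  | nil => intro c op; cases op <;> simp [pvALoop, pvE]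
  | cons x xs ih =>
    intro c op
    by_cases hx : x = 0 <;> cases op <;>
      simp [pvALoop, pvE, hx, ih] <;> ring

-- ===== VERDICT (by name: the statement is the Claim_ definition above) =====
theorem count_predicted_intervals_spec : Claim_equal_count_predicted_intervals := by
  intro l _
  unfold Spec_count_predicted_intervals count_predicted_intervals count_predicted_intervals_alt
  rw [pvALoop_flush, pvB_fold]
  simp
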